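-- pv_equiv track=rewrite | github.com/DntdToM/VaultX | logic/python/kmp.py | filter_accounts_with_kmp
-- ===== SOURCE A (Python) =====
-- def build_prefix_table(pattern):
--     """
--     Tính toán lps (longest prefix-suffix) cho chuỗi pattern.
--     Ex:
--         pattern: "ABABCABAB"
--         lps:     [0, 0, 1, 2, 0, 1, 2, 3, 4]
--
--     Args:
--         pattern: chuỗi con cần tìm kiếm trong chuỗi lớn.
--     Returns:
--         prefix_table: một mảng chứa độ dài của prefix dài nhất mà cũng là suffix cho mỗi vị trí trong pattern.
--     """
--     if pattern == "":
--         return []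
--
--     prefix_table = [0] * len(pattern)
--     length = 0
--     i = 1
--
--     while i < len(pattern):
--         if pattern[i] == pattern[length]:
--             length += 1
--             prefix_table[i] = length
--             i += 1
--         else:
--             if length != 0:
--                 length = prefix_table[length - 1]
--             else:
--                 prefix_table[i] = 0
--                 i += 1
--
--     return prefix_table
--
-- def kmp_includes(text, pattern):
--     """
--     Kiểm tra pattern có xuất hiện trong text hay không bằng thuật toán KMP.
--
--     Args:
--         text: Chuỗi lớn cần tìm kiếm.
--         pattern: Chuỗi con cần tìm.
--     Returns:
--         True nếu tìm thấy pattern trong text, ngược lại là False.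
--     """
--     if pattern == "":
--         return True
--
--     prefix_table = build_prefix_table(pattern)
--
--     i = j = 0
--     n = len(text)
--     m = len(pattern)
--
--     while i < n:
--         if text[i] == pattern[j]:
--             i += 1
--             j += 1
--
--             if j == m:
--                 return True
--         else:
--             if j != 0:
--                 j = prefix_table[j - 1]
--             else:
--                 i += 1
--
--     return False
--
-- def filter_accounts_with_kmp(accounts, query):
--     """
--     Lọc danh sách account bằng KMP.
--     Mỗi account trong list có thể có nhiều {domain: str, username: str, notes: str}
--
--     Nếu query xuất hiện trong một trong các field trên, account đó sẽ được giữ lại (hiển thị).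
--
--     Args:
--         accounts: Danh sách account dạng dict.
--         query: Từ khóa người dùng nhập vào ô search.
--     Returns:
--         Danh sách account thỏa điều kiện tìm kiếm.
--     """
--     if query == "":
--         return accounts
--
--     results = []
--     query = query.lower()
--
--     for account in accounts:
--         domain = str(account.get("domain", "")).lower()
--         username = str(account.get("username", "")).lower()
--         notes = str(account.get("notes", "")).lower()
--
--         if (kmp_includes(domain, query) or kmp_includes(username, query) or kmp_includes(notes, query)):
--             results.append(account)
--
--     return results
-- ===== SOURCE B (Python) =====
-- def filter_accounts_with_kmp(accounts, query):
--     if query == "":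
--         return accounts
--
--     query = query.lower()
--
--     return [
--         account
--         for account in accounts
--         if query in str(account.get("domain", "")).lower()
--         or query in str(account.get("username", "")).lower()
--         or query in str(account.get("notes", "")).lower()
--     ]
-- ===== Notes on version B (the rewrite author's own statement) =====
-- stated objective: idiomatic
-- what changed: Replaces the hand-written KMP prefix-table search (build_prefix_table + kmp_includes) with Python's built-in substring operator 'in' inside a list comprehension; the explicit failure-function automaton disappears entirely.
import Mathlib
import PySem

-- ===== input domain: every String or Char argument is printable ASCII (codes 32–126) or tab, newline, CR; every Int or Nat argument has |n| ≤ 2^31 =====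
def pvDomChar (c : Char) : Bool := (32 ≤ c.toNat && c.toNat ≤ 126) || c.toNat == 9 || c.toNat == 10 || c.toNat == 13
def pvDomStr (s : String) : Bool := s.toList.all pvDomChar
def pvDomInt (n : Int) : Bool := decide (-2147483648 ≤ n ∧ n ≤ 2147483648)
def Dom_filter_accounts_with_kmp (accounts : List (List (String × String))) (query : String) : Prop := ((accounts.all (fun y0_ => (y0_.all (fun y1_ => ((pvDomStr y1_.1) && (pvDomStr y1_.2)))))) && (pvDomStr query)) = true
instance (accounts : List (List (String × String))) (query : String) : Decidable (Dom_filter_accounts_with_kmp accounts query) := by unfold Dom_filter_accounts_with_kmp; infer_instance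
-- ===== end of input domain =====

-- B replaces A's hand-written KMP prefix-table substring search with Python's built-in
-- substring operator inside a list comprehension (ported as List.filter + PySem.Str.isIn);
-- objective: idiomatic. Return values are proved equal on all inputs.

-- ===== PORT A =====
-- while-loop of build_prefix_table; fuel only makes the recursion structural, it is
-- proved sufficient (the loop runs at most 2*len(pattern) iterations)
def pvBuildLoop (p : List Char) : Nat → List Nat → Nat → Nat → List Nat
  | 0, pt, _, _ => pt
  | fuel+1, pt, len, i =>
    if i < p.length then
      if p.getD i ' ' == p.getD len ' ' then
        pvBuildLoop p fuel (pt.set i (len+1)) (len+1) (i+1)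
      else if len ≠ 0 then
        pvBuildLoop p fuel pt (pt.getD (len-1) 0) i
      else
        pvBuildLoop p fuel (pt.set i 0) 0 (i+1)
    else pt

def build_prefix_table (pattern : String) : List Nat :=
  if pattern == "" then []
  else pvBuildLoop pattern.toList (2 * pattern.toList.length) (List.replicate pattern.toList.length 0) 0 1

-- while-loop of kmp_includes; fuel proved sufficient (at most 2*len(text)+1 iterations)
def pvKmpLoop (t p : List Char) (pt : List Nat) : Nat → Nat → Nat → Bool
  | 0, _, _ => false
  | fuel+1, i, j =>
    if i < t.length then
      if t.getD i ' ' == p.getD j ' ' then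
        if j + 1 = p.length then true
        else pvKmpLoop t p pt fuel (i+1) (j+1)
      else if j ≠ 0 then
        pvKmpLoop t p pt fuel i (pt.getD (j-1) 0)
      else
        pvKmpLoop t p pt fuel (i+1) 0
    else false

def kmp_includes (text pattern : String) : Bool :=
  if pattern == "" then true
  else pvKmpLoop text.toList pattern.toList (build_prefix_table pattern) (2 * text.toList.length + 1) 0 0

def filter_accounts_with_kmp (accounts : List (List (String × String))) (query : String) : List (List (String × String)) :=
  if query == "" then accounts
  else
    let q := PySem.Str.lower query
    accounts.foldl (fun results account =>
      let domain := PySem.Str.lower (PySem.Dict.getD (PySem.Dict.mk account) "domain" "")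
      let username := PySem.Str.lower (PySem.Dict.getD (PySem.Dict.mk account) "username" "")
      let notes := PySem.Str.lower (PySem.Dict.getD (PySem.Dict.mk account) "notes" "")
      if kmp_includes domain q || kmp_includes username q || kmp_includes notes q
      then results ++ [account] else results) []

-- ===== PORT B =====
def filter_accounts_with_kmp_alt (accounts : List (List (String × String))) (query : String) : List (List (String × String)) :=
  if query == "" then accounts
  else
    let q := PySem.Str.lower query
    accounts.filter (fun account =>
      PySem.Str.isIn q (PySem.Str.lower (PySem.Dict.getD (PySem.Dict.mk account) "domain" "")) ||
      PySem.Str.isIn q (PySem.Str.lower (PySem.Dict.getD (PySem.Dict.mk account) "username" "")) ||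
      PySem.Str.isIn q (PySem.Str.lower (PySem.Dict.getD (PySem.Dict.mk account) "notes" "")))

-- ===== PRECONDITION & SPEC =====
def Spec_filter_accounts_with_kmp (accounts : List (List (String × String))) (query : String) (out : List (List (String × String))) : Prop := out = filter_accounts_with_kmp_alt accounts query
instance (accounts : List (List (String × String))) (query : String) (out : List (List (String × String))) : Decidable (Spec_filter_accounts_with_kmp accounts query out) := by unfold Spec_filter_accounts_with_kmp; infer_instance

-- ===== CLAIM (what is proved, stated in full; the proofs are below) =====
def Claim_equal_filter_accounts_with_kmp : Prop := ∀ (accounts : List (List (String × String))) (query : String), Dom_filter_accounts_with_kmp accounts query → Spec_filter_accounts_with_kmp accounts query (filter_accounts_with_kmp accounts query)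

-- ===== LEMMAS AND PROOFS =====

-- longest proper border (prefix that is also a suffix) of q: the value KMP's lps table stores
def pvLps (q : List Char) : Nat :=
  Nat.findGreatest (fun b => b < q.length ∧ q.take b <:+ q) q.length

lemma pvLps_prop (q : List Char) (hq : q ≠ []) :
    pvLps q < q.length ∧ q.take (pvLps q) <:+ q :=
  Nat.findGreatest_spec (P := fun b => b < q.length ∧ q.take b <:+ q) (Nat.zero_le _)
    ⟨List.length_pos_of_ne_nil hq, by simp⟩

lemma pvLps_ge (q : List Char) (b : Nat) (hb : b < q.length) (hs : q.take b <:+ q) :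
    b ≤ pvLps q :=
  Nat.le_findGreatest (le_of_lt hb) ⟨hb, hs⟩

lemma pvLps_eq (q : List Char) (j : Nat) (hq : q ≠ []) (hj : j < q.length)
    (hs : q.take j <:+ q) (hmax : ∀ b, b < q.length → q.take b <:+ q → b ≤ j) :
    pvLps q = j :=
  le_antisymm (hmax _ (pvLps_prop q hq).1 (pvLps_prop q hq).2) (pvLps_ge q j hj hs)

lemma pvLps_one (q : List Char) (hq : q.length = 1) : pvLps q = 0 := by
  have h := (pvLps_prop q (by intro h; simp [h] at hq)).1
  omega

lemma pvTakeConcat (q : List Char) (b : Nat) (d : Char) (h : b < q.length) :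
    q.take (b+1) = q.take b ++ [q.getD b d] := by
  rw [List.getD_eq_getElem _ _ h]; exact List.take_succ_eq_append_getElem h

lemma pvSuffixConcat (xs ys : List Char) (c : Char) (h : xs <:+ ys) :
    xs ++ [c] <:+ ys ++ [c] := by
  obtain ⟨u, rfl⟩ := h; exact ⟨u, by simp⟩

lemma pvSuffixConcatInv (xs ys : List Char) (a c : Char) (h : xs ++ [a] <:+ ys ++ [c]) :
    a = c ∧ xs <:+ ys := by
  obtain ⟨u, hu⟩ := h
  rw [← List.append_assoc] at hu
  obtain ⟨h1, h2⟩ := List.append_inj' hu (by simp)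
  exact ⟨by simpa using h2, u, h1⟩

-- stepping a border down by its last character: if the first b chars of p are a suffix of
-- t.take (i+1) then the first b-1 chars are a suffix of t.take i and chars at b-1 / i agree
lemma pvBorderStep (p t : List Char) (b i : Nat) (d : Char) (hb : 1 ≤ b)
    (hbm : b ≤ p.length) (hi : i < t.length) (hs : p.take b <:+ t.take (i+1)) :
    p.getD (b-1) d = t.getD i d ∧ p.take (b-1) <:+ t.take i := by
  have hb1 : b - 1 < p.length := by omega
  have e1 : p.take b = p.take (b-1) ++ [p.getD (b-1) d] := by
    have := pvTakeConcat p (b-1) d hb1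
    rwa [Nat.sub_add_cancel hb] at this
  have e2 : t.take (i+1) = t.take i ++ [t.getD i d] := pvTakeConcat t i d hi
  rw [e1, e2] at hs
  obtain ⟨h1, h2⟩ := pvSuffixConcatInv _ _ _ _ hs
  exact ⟨h1, h2⟩

-- any border of p.take (i+2) is at most one longer than the longest border of p.take (i+1)
lemma pvInvNext (p : List Char) (i b : Nat) (hi : i + 1 < p.length) (hb : b < i+2)
    (hb1 : 1 ≤ b) (hs : p.take b <:+ p.take (i+2)) :
    b ≤ pvLps (p.take (i+1)) + 1 := by
  obtain ⟨_, h2⟩ := pvBorderStep p p b (i+1) ' ' hb1 (by omega) hi hs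
  have hq : (p.take (i+1)).length = i+1 := by
    rw [List.length_take]; omega
  have h3 : (p.take (i+1)).take (b-1) = p.take (b-1) := by
    rw [List.take_take]; congr 1; omega
  have : b - 1 ≤ pvLps (p.take (i+1)) :=
    pvLps_ge _ _ (by rw [hq]; omega) (by rw [h3]; exact h2)
  omega

-- a nonempty take and its length
lemma pvTakeLen (p : List Char) (j : Nat) (hj : j ≤ p.length) : (p.take j).length = j := by
  rw [List.length_take]; omega

lemma pvTakeNe (p : List Char) (j : Nat) (h1 : 1 ≤ j) (hj : j ≤ p.length) : p.take j ≠ [] := by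
  intro h
  have := pvTakeLen p j hj
  rw [h] at this; simp at this; omega

-- correctness of the build_prefix_table while-loop
lemma pvBuildLoop_spec (p : List Char) :
    ∀ (fuel : Nat) (pt : List Nat) (len i : Nat),
    1 ≤ i → i ≤ p.length → pt.length = p.length →
    (∀ k, k < i → pt.getD k 0 = pvLps (p.take (k+1))) →
    len < i → p.take len <:+ p.take i →
    (i < p.length → ∀ b, b < i+1 → p.take b <:+ p.take (i+1) → b ≤ len+1) →
    2 * (p.length - i) + len + 1 ≤ fuel →
    ∀ k, k < p.length → (pvBuildLoop p fuel pt len i).getD k 0 = pvLps (p.take (k+1)) := by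
  intro fuel
  induction fuel with
  | zero => intro pt len i h1 h2 hlen hpt hli ha hbinv hfuel; omega
  | succ f ih =>
    intro pt len i h1 h2 hlen hpt hli ha hbinv hfuel
    simp only [pvBuildLoop]
    by_cases hi : i < p.length
    · rw [if_pos hi]
      have hlenq : (p.take (i+1)).length = i+1 := pvTakeLen p (i+1) (by omega)
      have hql : p.take (i+1) ≠ [] := pvTakeNe p (i+1) (by omega) (by omega)
      by_cases hc : p.getD i ' ' = p.getD len ' '
      · rw [if_pos (by exact beq_iff_eq.mpr hc)]
        -- match branch: the new longest border of p.take (i+1) is len+1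
        have hlm : len < p.length := by omega
        have hb1 : p.take (len+1) <:+ p.take (i+1) := by
          rw [pvTakeConcat p len ' ' hlm, pvTakeConcat p i ' ' hi, hc]
          exact pvSuffixConcat _ _ _ ha
        have hlps : pvLps (p.take (i+1)) = len+1 := by
          apply pvLps_eq _ _ hql (by omega)
          · rw [List.take_take]
            have : min (len+1) (i+1) = len+1 := by omega
            rw [this]; exact hb1
          · intro b hbq hbs
            rw [hlenq] at hbq
            rw [List.take_take] at hbs
            have hmin : min b (i+1) = b := by omega
            rw [hmin] at hbs
            exact hbinv hi b (by omega) hbs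
        apply ih (pt.set i (len+1)) (len+1) (i+1) (by omega) (by omega) (by simpa using hlen)
        · intro k hk
          rcases Nat.lt_or_ge k i with hk' | hk'
          · rw [show (pt.set i (len+1)).getD k 0 = pt.getD k 0 by
              simp [List.getD_eq_getElem?_getD, List.getElem?_set_ne (by omega : i ≠ k)]]
            exact hpt k hk'
          · have : k = i := by omega
            subst this
            rw [show (pt.set k (len+1)).getD k 0 = len+1 by
              simp [List.getD_eq_getElem?_getD, hlen ▸ hi]]
            exact hlps.symm
        · omega
        · exact hb1
        · intro hi1 b hb hbs
          rcases Nat.eq_zero_or_pos b with hb0 | hb0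
          · omega
          · have := pvInvNext p i b hi1 hb hb0 hbs
            omega
        · omega
      · rw [if_neg (by simpa using hc)]
        by_cases hl0 : len = 0
        · rw [if_neg (by omega)]
          subst hl0
          -- mismatch with len = 0: lps of p.take (i+1) is 0
          have hlps0 : pvLps (p.take (i+1)) = 0 := by
            apply pvLps_eq _ _ hql (by omega) (by simp)
            intro b hbq hbs
            rw [hlenq] at hbq
            rw [List.take_take] at hbs
            have hmin : min b (i+1) = b := by omega
            rw [hmin] at hbs
            have hble : b ≤ 1 := hbinv hi b (by omega) hbs
            rcases Nat.eq_zero_or_pos b with h0 | h0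
            · omega
            · have hb1 : b = 1 := by omega
              subst hb1
              obtain ⟨hceq, -⟩ := pvBorderStep p p 1 i ' ' le_rfl (by omega) hi hbs
              simp at hceq
              exact absurd hceq.symm hc
          apply ih (pt.set i 0) 0 (i+1) (by omega) (by omega) (by simpa using hlen)
          · intro k hk
            rcases Nat.lt_or_ge k i with hk' | hk'
            · rw [show (pt.set i 0).getD k 0 = pt.getD k 0 by
                simp [List.getD_eq_getElem?_getD, List.getElem?_set_ne (by omega : i ≠ k)]]
              exact hpt k hk'
            · have : k = i := by omega
              subst this
              rw [show (pt.set k 0).getD k 0 = 0 by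
                simp [List.getD_eq_getElem?_getD, hlen ▸ hi]]
              exact hlps0.symm
          · omega
          · simp
          · intro hi1 b hb hbs
            rcases Nat.eq_zero_or_pos b with hb0 | hb0
            · omega
            · have := pvInvNext p i b hi1 hb hb0 hbs
              omega
          · omega
        · rw [if_pos (by omega)]
          -- fallback branch: len becomes lps(p.take len)
          have hlm : len < p.length := by omega
          have hlenl : (p.take len).length = len := pvTakeLen p len (by omega)
          have hnel : p.take len ≠ [] := pvTakeNe p len (by omega) (by omega)
          have hgd : pt.getD (len-1) 0 = pvLps (p.take len) := by
            have := hpt (len-1) (by omega)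
            rwa [Nat.sub_add_cancel (by omega)] at this
          obtain ⟨hlt, hbord⟩ := pvLps_prop (p.take len) hnel
          rw [hlenl] at hlt
          rw [hgd]
          have hanew : p.take (pvLps (p.take len)) <:+ p.take i := by
            have h5 : (p.take len).take (pvLps (p.take len)) = p.take (pvLps (p.take len)) := by
              rw [List.take_take]; congr 1; omega
            exact (h5 ▸ hbord).trans ha
          apply ih pt (pvLps (p.take len)) i h1 h2 hlen hpt (by omega) hanew
          · intro hi1 b hb hbs
            have hble : b ≤ len + 1 := hbinv hi1 b hb hbs
            rcases Nat.eq_or_lt_of_le hble with hbeq | hblt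
            · exfalso
              obtain ⟨hceq, -⟩ := pvBorderStep p p b i ' ' (by omega) (by omega) hi (hbeq ▸ hbs)
              rw [hbeq] at hceq
              simp at hceq
              exact hc hceq.symm
            · rcases Nat.eq_zero_or_pos b with hb0 | hb0
              · omega
              · have h6 : p.take len ++ [p.getD i ' '] <:+ p.take (i+1) := by
                  rw [pvTakeConcat p i ' ' hi]
                  exact pvSuffixConcat _ _ _ ha
                have h7 : p.take b <:+ p.take len ++ [p.getD i ' '] := by
                  apply List.suffix_of_suffix_length_le hbs h6
                  rw [pvTakeLen p b (by omega)]
                  simp [hlenl]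
                  omega
                have e1 : p.take b = p.take (b-1) ++ [p.getD (b-1) ' '] := by
                  have := pvTakeConcat p (b-1) ' ' (by omega)
                  rwa [Nat.sub_add_cancel hb0] at this
                rw [e1] at h7
                obtain ⟨-, hc2⟩ := pvSuffixConcatInv _ _ _ _ h7
                have : b - 1 ≤ pvLps (p.take len) := by
                  apply pvLps_ge _ _ (by rw [hlenl]; omega)
                  rw [List.take_take]
                  have : min (b-1) len = b-1 := by omega
                  rw [this]; exact hc2
                omega
          · omega
    · rw [if_neg hi]
      intro k hk
      exact hpt k (by omega)

-- correctness of the kmp_includes while-loop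
lemma pvKmpLoop_spec (t p : List Char) (pt : List Nat)
    (hpt : ∀ k, k < p.length → pt.getD k 0 = pvLps (p.take (k+1))) :
    ∀ (fuel : Nat) (i j : Nat), i ≤ t.length → j < p.length →
    p.take j <:+ t.take i →
    (i < t.length → ∀ b, b < p.length → p.take b <:+ t.take i →
      p.getD b ' ' = t.getD i ' ' → b ≤ j) →
    (∀ i', i' ≤ i → ¬ p <:+ t.take i') →
    2 * (t.length - i) + j + 1 ≤ fuel →
    (pvKmpLoop t p pt fuel i j = true ↔ ∃ i', i' ≤ t.length ∧ p <:+ t.take i') := by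
  intro fuel
  induction fuel with
  | zero => intro i j hi hj ha hb3 hc hfuel; omega
  | succ f ih =>
    intro i j hi hj ha hb3 hc hfuel
    simp only [pvKmpLoop]
    by_cases hin : i < t.length
    · rw [if_pos hin]
      by_cases heq : t.getD i ' ' = p.getD j ' '
      · rw [if_pos (by exact beq_iff_eq.mpr heq)]
        have hanew : p.take (j+1) <:+ t.take (i+1) := by
          rw [pvTakeConcat p j ' ' hj, pvTakeConcat t i ' ' hin, ← heq]
          exact pvSuffixConcat _ _ _ ha
        by_cases hjm : j + 1 = p.length
        · rw [if_pos hjm]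
          simp only [true_iff]
          refine ⟨i+1, by omega, ?_⟩
          have : p.take (j+1) = p := by rw [hjm]; exact List.take_length
          rwa [this] at hanew
        · rw [if_neg hjm]
          -- matched one more character
          have hcnew : ∀ i', i' ≤ i+1 → ¬ p <:+ t.take i' := by
            intro i' hi' hsuf
            rcases Nat.lt_or_ge i' (i+1) with h' | h'
            · exact hc i' (by omega) hsuf
            · have : i' = i+1 := by omega
              subst this
              have hm1 : 1 ≤ p.length := by omega
              obtain ⟨hceq, hsuf'⟩ := pvBorderStep p t p.length i ' ' (by omega) le_rfl hin
                (by rwa [List.take_length])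
              have := hb3 hin (p.length - 1) (by omega) hsuf' hceq
              omega
          apply ih (i+1) (j+1) (by omega) (by omega) hanew ?_ hcnew (by omega)
          intro hin1 b hb hbs hbeq
          rcases Nat.eq_zero_or_pos b with hb0 | hb0
          · omega
          · obtain ⟨hceq, hsuf'⟩ := pvBorderStep p t b i ' ' hb0 (by omega) hin hbs
            have := hb3 hin (b-1) (by omega) hsuf' hceq
            omega
      · rw [if_neg (by simpa using heq)]
        by_cases hj0 : j = 0
        · rw [if_neg (by omega)]
          subst hj0
          -- mismatch at j = 0: just advance i
          apply ih (i+1) 0 (by omega) hj (by simp) ?_ ?_ (by omega)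
          · intro hin1 b hb hbs hbeq
            rcases Nat.eq_zero_or_pos b with hb0 | hb0
            · omega
            · exfalso
              obtain ⟨hceq, hsuf'⟩ := pvBorderStep p t b i ' ' hb0 (by omega) hin hbs
              have := hb3 hin (b-1) (by omega) hsuf' hceq
              have hb1 : b = 1 := by omega
              rw [hb1] at hceq
              simp at hceq
              exact heq hceq.symm
          · intro i' hi' hsuf
            rcases Nat.lt_or_ge i' (i+1) with h' | h'
            · exact hc i' (by omega) hsuf
            · have : i' = i+1 := by omega
              subst this
              obtain ⟨hceq, hsuf'⟩ := pvBorderStep p t p.length i ' ' (by omega) le_rfl hin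
                (by rwa [List.take_length])
              have := hb3 hin (p.length - 1) (by omega) hsuf' hceq
              have hm1 : p.length = 1 := by omega
              rw [hm1] at hceq
              simp at hceq
              exact heq hceq.symm
        · rw [if_pos (by omega)]
          -- fallback: j becomes lps(p.take j)
          have hlenj : (p.take j).length = j := pvTakeLen p j (by omega)
          have hnej : p.take j ≠ [] := pvTakeNe p j (by omega) (by omega)
          have hgd : pt.getD (j-1) 0 = pvLps (p.take j) := by
            have := hpt (j-1) (by omega)
            rwa [Nat.sub_add_cancel (by omega)] at this
          obtain ⟨hlt, hbord⟩ := pvLps_prop (p.take j) hnej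
          rw [hlenj] at hlt
          rw [hgd]
          have hanew : p.take (pvLps (p.take j)) <:+ t.take i := by
            have h5 : (p.take j).take (pvLps (p.take j)) = p.take (pvLps (p.take j)) := by
              rw [List.take_take]; congr 1; omega
            exact (h5 ▸ hbord).trans ha
          apply ih i (pvLps (p.take j)) hi (by omega) hanew ?_ hc (by omega)
          intro hin1 b hb hbs hbeq
          have hble : b ≤ j := hb3 hin b hb hbs hbeq
          rcases Nat.eq_or_lt_of_le hble with hbeq' | hblt
          · exfalso
            rw [hbeq'] at hbeq
            exact heq hbeq.symm
          · rcases Nat.eq_zero_or_pos b with hb0 | hb0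
            · omega
            · have h7 : p.take b <:+ p.take j := by
                apply List.suffix_of_suffix_length_le hbs ha
                rw [pvTakeLen p b (by omega), hlenj]
                omega
              have : b ≤ pvLps (p.take j) := by
                apply pvLps_ge _ _ (by rw [hlenj]; omega)
                rw [List.take_take]
                have : min b j = b := by omega
                rw [this]; exact h7
              omega
    · rw [if_neg hin]
      constructor
      · intro h; exact absurd h (by simp)
      · rintro ⟨i', hi', hsuf⟩
        exact absurd hsuf (hc i' (by omega))

lemma pvOccIff (p t : List Char) :
    (∃ i', i' ≤ t.length ∧ p <:+ t.take i') ↔ p <:+: t := by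
  constructor
  · rintro ⟨i', _, hs⟩
    exact List.infix_iff_suffix_prefix.mpr ⟨t.take i', hs, List.take_prefix _ _⟩
  · intro h
    obtain ⟨u, hsuf, hpre⟩ := List.infix_iff_suffix_prefix.mp h
    exact ⟨u.length, hpre.length_le, by rw [← List.prefix_iff_eq_take.mp hpre]; exact hsuf⟩

lemma kmp_includes_eq (text pattern : String) :
    kmp_includes text pattern = PySem.Str.isIn pattern text := by
  unfold kmp_includes
  by_cases h : pattern = ""
  · rw [if_pos (by simpa using h)]
    rw [Bool.eq_iff_iff, PySem.Str.isIn_iff_infix]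
    simp [h]
  · rw [if_neg (by simpa using h)]
    have hpne : pattern.toList ≠ [] := fun hh => h (String.toList_eq_nil_iff.mp hh)
    have hm : 1 ≤ pattern.toList.length := List.length_pos_of_ne_nil hpne
    have hpt : ∀ k, k < pattern.toList.length →
        (build_prefix_table pattern).getD k 0 = pvLps (pattern.toList.take (k+1)) := by
      unfold build_prefix_table
      rw [if_neg (by simpa using h)]
      apply pvBuildLoop_spec pattern.toList _ _ 0 1 le_rfl hm (by simp)
      · intro k hk
        have hk0 : k = 0 := by omega
        subst hk0
        rw [show (List.replicate pattern.toList.length (0:Nat)).getD 0 0 = 0 by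
          cases hn : pattern.toList.length <;> simp [List.replicate_succ]]
        exact (pvLps_one _ (pvTakeLen _ 1 hm)).symm
      · omega
      · simp
      · intro _ b hb _; omega
      · omega
    have hloop := pvKmpLoop_spec text.toList pattern.toList (build_prefix_table pattern) hpt
      (2 * text.toList.length + 1) 0 0 (by omega) (by omega) (by simp)
      (by intro _ b hb hbs _
          rw [List.take_zero, List.suffix_nil] at hbs
          have h2 := congrArg List.length hbs
          rw [List.length_take] at h2
          simp only [List.length_nil] at h2
          omega)
      (by intro i' hi' hsuf
          have : i' = 0 := by omega
          subst this
          rw [List.take_zero, List.suffix_nil] at hsuf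
          exact hpne hsuf)
      (by omega)
    rw [Bool.eq_iff_iff, hloop, pvOccIff]
    exact (PySem.Str.isIn_iff_infix _ _).symm

-- ===== VERDICT (by name: the statement is the Claim_ definition above) =====
theorem filter_accounts_with_kmp_spec : Claim_equal_filter_accounts_with_kmp := by
  intro accounts query _
  unfold Spec_filter_accounts_with_kmp filter_accounts_with_kmp filter_accounts_with_kmp_alt
  by_cases h : query == ""
  · simp [h]
  · simp only [h, Bool.false_eq_true, if_false]
    rw [PySem.List.foldl_append_if_eq_filter]
    rw [List.nil_append]
    apply List.filter_congr
    intro a _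
    simp only [kmp_includes_eq]
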